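-- pv_equiv track=rewrite | github.com/xyax/Grouping | clustering.py | initCenters
-- ===== SOURCE A (Python) =====
-- def mostDistant(nums, centers):
--     mins = []
--     for n in nums:
--         dists = []
--         for c in centers:
--             dists.append(abs(n-c))
--         mins.append(min(dists))
--     return nums[mins.index(max(mins))]
--
-- def initCenters(nums, k):
--     centers = []
--     if(k>1):
--         centers.append(min(nums))
--         centers.append(max(nums))
--     for i in range(k-2):
--             centers.append(mostDistant(nums, centers))
--     centers = orderCenters(centers, nums)
--     return centers
--
-- def orderCenters(centers, nums):
--     newCenters = []
--     for n in nums: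
--         if (n in centers):
--             newCenters.append(n)
--             centers.remove(n)
--     return newCenters
-- ===== SOURCE B (Python) =====
-- def initCenters(nums, k):
--     # farthest-point selection with an incrementally maintained min-distance array: O(k*n) instead of O(k^2*n)
--     if k <= 1:
--         return []
--     lo, hi = min(nums), max(nums)
--     centers = [lo, hi]
--     mind = [min(abs(n - lo), abs(n - hi)) for n in nums]
--     for _ in range(k - 2):
--         c = nums[mind.index(max(mind))]
--         centers.append(c)
--         mind = [min(d, abs(n - c)) for d, n in zip(mind, nums)]
--     counts = {}
--     for c in centers:
--         counts[c] = counts.get(c, 0) + 1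
--     out = []
--     for n in nums:
--         if counts.get(n, 0) > 0:
--             out.append(n)
--             counts[n] -= 1
--     return out
-- ===== Notes on version B (the rewrite author's own statement) =====
-- stated objective: faster
-- what changed: B keeps a running min-distance array updated incrementally with each new center (and orders the result via a count dictionary instead of repeated list.remove), instead of recomputing all distances to every center in each round.
import Mathlib
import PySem

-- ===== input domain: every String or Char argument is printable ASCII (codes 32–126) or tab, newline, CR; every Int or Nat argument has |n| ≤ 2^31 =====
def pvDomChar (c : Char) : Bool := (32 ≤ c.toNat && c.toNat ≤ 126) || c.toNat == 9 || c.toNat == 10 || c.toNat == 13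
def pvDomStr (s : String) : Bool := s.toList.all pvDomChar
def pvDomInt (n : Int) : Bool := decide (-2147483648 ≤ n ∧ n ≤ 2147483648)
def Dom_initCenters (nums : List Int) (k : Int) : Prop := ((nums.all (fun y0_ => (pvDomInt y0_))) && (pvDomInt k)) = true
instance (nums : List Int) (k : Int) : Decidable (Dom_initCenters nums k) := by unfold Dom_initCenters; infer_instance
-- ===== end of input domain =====

-- B replaces A's per-round recomputation of all point-to-center distances by an incrementally
-- updated min-distance array, and the final ordering pass by a count dictionary: O(k*n) vs O(k^2*n).

-- ===== PORT A =====
-- min/max/index/nums[...] raise only on empty lists; under Pre_ (nums ≠ [] when k > 1) the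
-- lists are nonempty at every call, so the `.getD` defaults are never taken.
def mostDistant (nums centers : List Int) : Int :=
  let mins := nums.map (fun n =>
    (PySem.List.min? (centers.map (fun c => |n - c|)) (fun y => y)).getD 0)
  PySem.List.pyGetD nums
    (((PySem.List.index? mins ((PySem.List.max? mins (fun y => y)).getD 0)).getD 0 : Nat) : Int) 0

def orderCenters (centers nums : List Int) : List Int :=
  (nums.foldl
    (fun (st : List Int × List Int) n =>
      if n ∈ st.1 then ((PySem.List.remove? st.1 n).getD st.1, st.2 ++ [n]) else st)
    (centers, [])).2

def initCenters (nums : List Int) (k : Int) : List Int :=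
  let centers : List Int := []
  let centers := if k > 1 then
      centers ++ [(PySem.List.min? nums (fun y => y)).getD 0,
                  (PySem.List.max? nums (fun y => y)).getD 0]
    else centers
  let centers := (List.range (k - 2).toNat).foldl (fun cs _ => cs ++ [mostDistant nums cs]) centers
  orderCenters centers nums

-- ===== PORT B =====
def initCenters_alt (nums : List Int) (k : Int) : List Int :=
  if k ≤ 1 then []
  else
    let lo := (PySem.List.min? nums (fun y => y)).getD 0
    let hi := (PySem.List.max? nums (fun y => y)).getD 0
    let st := (List.range (k - 2).toNat).foldl
      (fun (st : List Int × List Int) _ =>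
        let mind := st.2
        let c := PySem.List.pyGetD nums
          (((PySem.List.index? mind ((PySem.List.max? mind (fun y => y)).getD 0)).getD 0 : Nat) : Int) 0
        (st.1 ++ [c], (mind.zip nums).map (fun p => min p.1 |p.2 - c|)))
      ([lo, hi], nums.map (fun n => min |n - lo| |n - hi|))
    let counts := st.1.foldl (fun (d : PySem.Dict Int Int) c => d.insert c (d.getD c 0 + 1))
      PySem.Dict.empty
    (nums.foldl
      (fun (st : PySem.Dict Int Int × List Int) n =>
        if st.1.getD n 0 > 0 then (st.1.insert n (st.1.getD n 0 - 1), st.2 ++ [n]) else st)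
      (counts, [])).2

-- ===== PRECONDITION & SPEC =====
-- Pre_ excludes only empty nums with k > 1, where A raises ValueError from min([]).
def Pre_initCenters (nums : List Int) (k : Int) : Prop := 1 < k → nums ≠ []
instance (nums : List Int) (k : Int) : Decidable (Pre_initCenters nums k) := by
  unfold Pre_initCenters; infer_instance
def pvWitness_initCenters : List Int × Int := ([1, 5, 3], 3)
def Spec_initCenters (nums : List Int) (k : Int) (out : List Int) : Prop := out = initCenters_alt nums k
instance (nums : List Int) (k : Int) (out : List Int) : Decidable (Spec_initCenters nums k out) := by unfold Spec_initCenters; infer_instance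

-- ===== CLAIM (what is proved, stated in full; the proofs are below) =====
def Claim_equal_initCenters : Prop := ∀ (nums : List Int) (k : Int), Dom_initCenters nums k → Pre_initCenters nums k → Spec_initCenters nums k (initCenters nums k)

-- ===== LEMMAS AND PROOFS =====

-- min distance of n to a center list
def mdist (n : Int) (cs : List Int) : Int :=
  (PySem.List.min? (cs.map (fun c => |n - c|)) (fun y => y)).getD 0

theorem mdist_append (n c : Int) (cs : List Int) (h : cs ≠ []) :
    mdist n (cs ++ [c]) = min (mdist n cs) |n - c| := by
  obtain ⟨c0, ct, rfl⟩ := List.exists_cons_of_ne_nil h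
  simp [mdist, PySem.List.min?_id_cons, List.foldl_append]

theorem zip_map_self {α β γ : Type} (f : α → β) (g : β → α → γ) (l : List α) :
    ((l.map f).zip l).map (fun p => g p.1 p.2) = l.map (fun n => g (f n) n) := by
  induction l with
  | nil => rfl
  | cons x t ih => simp [ih]

theorem mostDistant_eq (nums cs : List Int) :
    mostDistant nums cs =
      PySem.List.pyGetD nums
        (((PySem.List.index? (nums.map (fun n => mdist n cs))
            ((PySem.List.max? (nums.map (fun n => mdist n cs)) (fun y => y)).getD 0)).getD 0 : Nat) : Int) 0 := by
  rfl

-- the selection loops run in lock-step: B's second component is always the min-distance map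
theorem select_loop (l : List Nat) (nums : List Int) :
    ∀ cs : List Int, cs ≠ [] →
      l.foldl
        (fun (st : List Int × List Int) _ =>
          let mind := st.2
          let c := PySem.List.pyGetD nums
            (((PySem.List.index? mind ((PySem.List.max? mind (fun y => y)).getD 0)).getD 0 : Nat) : Int) 0
          (st.1 ++ [c], (mind.zip nums).map (fun p => min p.1 |p.2 - c|)))
        (cs, nums.map (fun n => mdist n cs))
      = (l.foldl (fun cs _ => cs ++ [mostDistant nums cs]) cs,
         nums.map (fun n => mdist n (l.foldl (fun cs _ => cs ++ [mostDistant nums cs]) cs))) := by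
  induction l with
  | nil => intro cs h; rfl
  | cons x t ih =>
    intro cs h
    have hc : PySem.List.pyGetD nums
        (((PySem.List.index? (nums.map (fun n => mdist n cs))
            ((PySem.List.max? (nums.map (fun n => mdist n cs)) (fun y => y)).getD 0)).getD 0 : Nat) : Int) 0
        = mostDistant nums cs := (mostDistant_eq nums cs).symm
    simp only [List.foldl_cons, hc]
    have hzip : (((nums.map (fun n => mdist n cs)).zip nums).map
          (fun p => min p.1 |p.2 - mostDistant nums cs|))
        = nums.map (fun n => mdist n (cs ++ [mostDistant nums cs])) := by
      rw [zip_map_self (fun n => mdist n cs) (fun d n => min d |n - mostDistant nums cs|) nums]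
      exact List.map_congr_left (fun n _ => (mdist_append n (mostDistant nums cs) cs h).symm)
    rw [hzip]
    exact ih (cs ++ [mostDistant nums cs]) (by simp)

-- the ordering loops agree whenever the dict holds the multiset counts of the center list
theorem order_loop (nums : List Int) :
    ∀ (cs : List Int) (d : PySem.Dict Int Int) (out : List Int),
      (∀ x : Int, d.getD x 0 = (cs.count x : Int)) →
      (nums.foldl
        (fun (st : PySem.Dict Int Int × List Int) n =>
          if st.1.getD n 0 > 0 then (st.1.insert n (st.1.getD n 0 - 1), st.2 ++ [n]) else st)
        (d, out)).2
      = (nums.foldl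
          (fun (st : List Int × List Int) n =>
            if n ∈ st.1 then ((PySem.List.remove? st.1 n).getD st.1, st.2 ++ [n]) else st)
          (cs, out)).2 := by
  induction nums with
  | nil => intro cs d out h; rfl
  | cons n t ih =>
    intro cs d out h
    by_cases hm : n ∈ cs
    · have hpos : d.getD n 0 > 0 := by
        rw [h n]
        exact_mod_cast List.count_pos_iff.mpr hm
      rw [List.foldl_cons, List.foldl_cons, if_pos hpos, if_pos hm,
          PySem.List.remove?_eq_some_erase cs n hm]
      simp only [Option.getD_some]
      apply ih
      intro x
      rw [PySem.Dict.getD_insert]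
      by_cases hx : x = n
      · subst hx
        rw [if_pos rfl, h x, List.count_erase_self]
        have : 0 < cs.count x := List.count_pos_iff.mpr hm
        omega
      · rw [if_neg hx, h x, List.count_erase_of_ne hx]
    · have hz : ¬ d.getD n 0 > 0 := by
        rw [h n, List.count_eq_zero_of_not_mem hm]; omega
      rw [List.foldl_cons, List.foldl_cons, if_neg hz, if_neg hm]
      exact ih cs d out h

theorem counter_counts (cs : List Int) (x : Int) :
    (cs.foldl (fun (d : PySem.Dict Int Int) c => d.insert c (d.getD c 0 + 1))
      PySem.Dict.empty).getD x 0 = (cs.count x : Int) := by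
  rw [PySem.Dict.foldl_insert_getD_add_one_eq_counter, PySem.Dict.getD_counter]

theorem orderCenters_eq_alt (cs nums : List Int) :
    (nums.foldl
      (fun (st : PySem.Dict Int Int × List Int) n =>
        if st.1.getD n 0 > 0 then (st.1.insert n (st.1.getD n 0 - 1), st.2 ++ [n]) else st)
      (cs.foldl (fun (d : PySem.Dict Int Int) c => d.insert c (d.getD c 0 + 1)) PySem.Dict.empty,
       [])).2 = orderCenters cs nums :=
  order_loop nums cs _ [] (counter_counts cs)

theorem orderCenters_nil (nums : List Int) : orderCenters [] nums = [] := by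
  unfold orderCenters
  induction nums with
  | nil => rfl
  | cons n t ih => simpa using ih

-- ===== VERDICT (by name: the statement is the Claim_ definition above) =====
theorem initCenters_spec : Claim_equal_initCenters := by
  intro nums k _ hpre
  unfold Spec_initCenters initCenters initCenters_alt
  by_cases hk : k ≤ 1
  · have hk' : ¬ k > 1 := by omega
    have h2 : (k - 2).toNat = 0 := by omega
    simp only [if_pos hk, if_neg hk', h2, List.range_zero, List.foldl_nil]
    exact orderCenters_nil nums
  · have hk1 : k > 1 := by omega
    have hne : nums ≠ [] := hpre hk1
    simp only [if_neg hk, if_pos hk1, List.nil_append]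
    set lo := (PySem.List.min? nums (fun y => y)).getD 0 with hlo
    set hi := (PySem.List.max? nums (fun y => y)).getD 0 with hhi
    have hinit : nums.map (fun n => min |n - lo| |n - hi|)
        = nums.map (fun n => mdist n [lo, hi]) := by
      apply List.map_congr_left
      intro n _
      simp [mdist, PySem.List.min?_id_cons]
    rw [hinit, select_loop (List.range (k - 2).toNat) nums [lo, hi] (by simp)]
    exact (orderCenters_eq_alt _ nums).symm
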